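-- pv_equiv track=rewrite | github.com/semirm-dev/agent-army | src/agent_army/frontmatter.py | extract_h1
-- ===== SOURCE A (Python) =====
-- def extract_h1(content: str) -> str:
--     """Return the first ``# Heading`` line after frontmatter.
--
--     If the file has no frontmatter the entire content is searched.
--     Returns an empty string when no H1 is found.
--     """
--     past_frontmatter = False
--     fm_count = 0
--     for line in content.splitlines():
--         if line.rstrip() == "---":
--             fm_count += 1
--             if fm_count >= 2:
--                 past_frontmatter = True
--             continue
--         if not past_frontmatter and fm_count == 0:
--             # No frontmatter at all -- search from the start.
--             past_frontmatter = True
--         if past_frontmatter and line.startswith("# "):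
--             return line[2:].strip()
--     return ""
-- ===== SOURCE B (Python) =====
-- def extract_h1(content: str) -> str:
--     """Return the first ``# Heading`` line after frontmatter.
--
--     Two phases: find where the body starts (after a closing '---' fence, if
--     the first line opens one), then scan the body for the first H1.
--     """
--     lines = content.splitlines()
--     body = lines
--     if lines and lines[0].rstrip() == "---":
--         for i in range(1, len(lines)):
--             if lines[i].rstrip() == "---":
--                 body = lines[i + 1:]
--                 break
--         else:
--             return ""
--     for line in body:
--         if line.startswith("# "):
--             return line[2:].strip()
--     return ""
-- ===== Notes on version B (the rewrite author's own statement) =====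
-- stated objective: simpler
-- what changed: Replaced A's single interleaved state machine (past_frontmatter flag plus fm_count counter updated per line) with two explicit phases: first locate the body start after the frontmatter's closing fence (or return '' if the opening fence is never closed), then a clean scan of the body for the first H1 heading line.
import Mathlib
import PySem

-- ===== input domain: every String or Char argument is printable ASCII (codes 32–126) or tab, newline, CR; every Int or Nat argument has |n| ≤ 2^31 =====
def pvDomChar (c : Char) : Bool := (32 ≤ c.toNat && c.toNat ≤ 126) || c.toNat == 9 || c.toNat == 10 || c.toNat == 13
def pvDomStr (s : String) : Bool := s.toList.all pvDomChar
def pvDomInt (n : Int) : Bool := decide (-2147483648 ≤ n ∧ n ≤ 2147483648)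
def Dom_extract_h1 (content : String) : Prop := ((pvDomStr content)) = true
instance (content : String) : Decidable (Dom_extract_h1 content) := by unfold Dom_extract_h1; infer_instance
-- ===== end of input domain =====

-- B replaces A's interleaved fm_count/past_frontmatter state machine with two plain phases
-- (find the body start after the frontmatter fences, then scan the body) — objective: simpler.

-- ===== PORT A =====
-- A's single loop carrying the (past_frontmatter, fm_count) state.
def extractH1Loop (lines : List String) (past : Bool) (fm : Int) : String :=
  match lines with
  | [] => ""
  | line :: rest =>
    if PySem.Str.rstrip line = "---" then
      extractH1Loop rest (if fm + 1 ≥ 2 then true else past) (fm + 1)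
    else
      let past' := if !past && fm == 0 then true else past
      if past' && PySem.Str.startswith line "# " then
        PySem.Str.strip (PySem.Str.slice line (some 2) none)
      else
        extractH1Loop rest past' fm

def extract_h1 (content : String) : String :=
  extractH1Loop (PySem.Str.splitlines content) false 0

-- ===== PORT B =====
-- Phase 2: scan the body for the first line starting with "# ".
def scanBody (lines : List String) : String :=
  match lines with
  | [] => ""
  | line :: rest =>
    if PySem.Str.startswith line "# " then
      PySem.Str.strip (PySem.Str.slice line (some 2) none)
    else
      scanBody rest

-- Phase 1 helper: the lines after the first closing fence, if any.
def findClose (lines : List String) : Option (List String) :=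
  match lines with
  | [] => none
  | line :: rest =>
    if PySem.Str.rstrip line = "---" then some rest else findClose rest

def extract_h1_alt (content : String) : String :=
  match PySem.Str.splitlines content with
  | [] => ""
  | first :: rest =>
    if PySem.Str.rstrip first = "---" then
      match findClose rest with
      | some body => scanBody body
      | none => ""
    else
      scanBody (first :: rest)

-- ===== PRECONDITION & SPEC =====
def Spec_extract_h1 (content : String) (out : String) : Prop := out = extract_h1_alt content
instance (content : String) (out : String) : Decidable (Spec_extract_h1 content out) := by unfold Spec_extract_h1; infer_instance

-- ===== CLAIM (what is proved, stated in full; the proofs are below) =====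
def Claim_equal_extract_h1 : Prop := ∀ (content : String), Dom_extract_h1 content → Spec_extract_h1 content (extract_h1 content)

-- ===== LEMMAS AND PROOFS =====

-- A line starting with "# " never rstrips to "---" (rstrip only removes trailing chars).
theorem startswith_hash_not_fence (l : String)
    (h : PySem.Str.startswith l "# " = true) : PySem.Str.rstrip l ≠ "---" := by
  intro hc
  have hpre : ("# ".toList) <+: l.toList := by
    have := h
    simp [PySem.Str.startswith] at this
    exact (PySem.Chars.startswith_iff _ _).mp this
  have hr : PySem.Chars.rstrip l.toList = "---".toList := by
    have := congrArg String.toList hc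
    simpa using this
  have hrpre : PySem.Chars.rstrip l.toList <+: l.toList := by
    unfold PySem.Chars.rstrip
    have hsuf : (l.toList.reverse.dropWhile PySem.Chars.isspace) <:+ l.toList.reverse :=
      List.dropWhile_suffix _
    have := List.reverse_prefix.mpr hsuf
    simpa using this
  rw [hr] at hrpre
  obtain ⟨t1, e1⟩ := hpre
  obtain ⟨t2, e2⟩ := hrpre
  rw [← e1] at e2
  have e2' : ('-' :: '-' :: '-' :: t2) = ('#' :: ' ' :: t1) := e2
  simp at e2'

-- Once past_frontmatter is true, A's loop is exactly B's body scan (fence lines cannot be H1s).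
theorem loop_true_eq_scanBody (lines : List String) (fm : Int) :
    extractH1Loop lines true fm = scanBody lines := by
  induction lines generalizing fm with
  | nil => rfl
  | cons line rest ih =>
    by_cases hf : PySem.Str.rstrip line = "---"
    · have hsw : PySem.Str.startswith line "# " = false := by
        by_contra hne
        exact startswith_hash_not_fence line (by simpa using hne) hf
      simp at hsw
      simp [extractH1Loop, scanBody, hf, hsw, ih]
    · simp [extractH1Loop, scanBody, hf, ih]

-- Inside an open frontmatter block, A's loop skips to the closing fence, exactly as findClose.
theorem loop_false_one_eq_findClose (lines : List String) :
    extractH1Loop lines false 1 =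
      (match findClose lines with
       | some body => scanBody body
       | none => "") := by
  induction lines with
  | nil => rfl
  | cons line rest ih =>
    by_cases hf : PySem.Str.rstrip line = "---"
    · simp [extractH1Loop, findClose, hf, loop_true_eq_scanBody]
    · simp [extractH1Loop, findClose, hf, ih]

-- ===== VERDICT (by name: the statement is the Claim_ definition above) =====
theorem extract_h1_spec : Claim_equal_extract_h1 := by
  intro content _
  unfold Spec_extract_h1 extract_h1 extract_h1_alt
  cases hsplit : PySem.Str.splitlines content with
  | nil => rfl
  | cons first rest =>
    by_cases hf : PySem.Str.rstrip first = "---"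
    · simp [extractH1Loop, hf, loop_false_one_eq_findClose]
    · simp [extractH1Loop, scanBody, hf, loop_true_eq_scanBody]
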